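-- pv_equiv track=rewrite | github.com/pikk7/AOC2024 | day2/main.py | different_version_of_array
-- ===== SOURCE A (Python) =====
-- def different_version_of_array(my_list):
--     return_list=[]
--
--     i=0
--     while(i<len(my_list)):
--         tmp= my_list[0:i]+my_list[i+1:len(my_list)]
--
--         return_list.append(tmp)
--         i=i+1
--
--     return return_list
-- ===== SOURCE B (Python) =====
-- def different_version_of_array(my_list):
--     return [[x for j, x in enumerate(my_list) if j != i]
--             for i in range(len(my_list))]
-- ===== Notes on version B (the rewrite author's own statement) =====
-- stated objective: idiomatic
-- what changed: each row is built by one enumerate-and-filter scan that skips index i, instead of concatenating two slices my_list[0:i]+my_list[i+1:]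
import Mathlib
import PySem

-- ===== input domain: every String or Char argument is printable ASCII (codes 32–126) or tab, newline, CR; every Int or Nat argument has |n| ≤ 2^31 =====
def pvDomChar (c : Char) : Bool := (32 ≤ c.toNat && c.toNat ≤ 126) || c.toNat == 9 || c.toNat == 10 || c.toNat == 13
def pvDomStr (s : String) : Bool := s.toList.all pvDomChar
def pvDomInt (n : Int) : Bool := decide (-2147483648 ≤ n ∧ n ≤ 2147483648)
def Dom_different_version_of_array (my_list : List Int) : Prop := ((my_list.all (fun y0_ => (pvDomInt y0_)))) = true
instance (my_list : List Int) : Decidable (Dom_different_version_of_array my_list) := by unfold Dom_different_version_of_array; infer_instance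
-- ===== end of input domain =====

-- B builds each row by one enumerate-and-filter scan skipping index i, instead of A's
-- concatenation of the two slices my_list[0:i] + my_list[i+1:len] (idiomatic; same cost).

-- ===== PORT A =====
-- the while loop: counter i, accumulator return_list; fuel = length+1 is enough since i starts at 0 and increases by 1
def dvaLoop (xs : List Int) (ret : List (List Int)) (i : Int) : Nat → List (List Int)
  | 0 => ret
  | fuel + 1 =>
    if i < (xs.length : Int) then
      dvaLoop xs
        (ret ++ [PySem.List.slice xs (some 0) (some i) ++ PySem.List.slice xs (some (i + 1)) (some (xs.length : Int))])
        (i + 1) fuel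
    else ret

def different_version_of_array (my_list : List Int) : List (List Int) :=
  dvaLoop my_list [] 0 (my_list.length + 1)

-- ===== PORT B =====
def different_version_of_array_alt (my_list : List Int) : List (List Int) :=
  (PySem.List.pyRange 0 (my_list.length : Int) 1).map (fun i =>
    ((PySem.List.enumerate my_list 0).filter (fun p => p.1 ≠ i)).map (·.2))

-- ===== PRECONDITION & SPEC =====
def Spec_different_version_of_array (my_list : List Int) (out : List (List Int)) : Prop := out = different_version_of_array_alt my_list
instance (my_list : List Int) (out : List (List Int)) : Decidable (Spec_different_version_of_array my_list out) := by unfold Spec_different_version_of_array; infer_instance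

-- ===== CLAIM (what is proved, stated in full; the proofs are below) =====
def Claim_equal_different_version_of_array : Prop := ∀ (my_list : List Int), Dom_different_version_of_array my_list → Spec_different_version_of_array my_list (different_version_of_array my_list)

-- ===== LEMMAS AND PROOFS =====

-- A's row at index i (0 ≤ i < len) is take ++ drop
lemma dva_rowA (xs : List Int) (i : Int) (h0 : 0 ≤ i) :
    PySem.List.slice xs (some 0) (some i) ++ PySem.List.slice xs (some (i + 1)) (some (xs.length : Int))
      = xs.take i.toNat ++ xs.drop (i.toNat + 1) := by
  rw [PySem.List.slice_toNat xs (by omega) h0, PySem.List.slice_toNat xs (by omega) (by positivity)]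
  have h2 : (i + 1).toNat = i.toNat + 1 := by omega
  simp only [Int.toNat_zero, List.drop_zero, Nat.sub_zero, Int.toNat_natCast, h2]
  congr 1
  exact List.take_of_length_le (by simp)

-- all indices in enumerate xs s are ≥ s, so filtering out i < s keeps everything
lemma dva_enumFilter_lt (xs : List Int) : ∀ (s i : Int), i < s →
    ((PySem.List.enumerate xs s).filter (fun p => p.1 ≠ i)).map (·.2) = xs := by
  induction xs with
  | nil => intro s i h; simp [PySem.List.enumerate_nil]
  | cons x xs ih =>
    intro s i h
    rw [PySem.List.enumerate_cons]
    simp only [List.filter_cons]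
    rw [if_pos (by simp; omega)]
    simp only [List.map_cons, ih (s + 1) i (by omega)]

-- filtering index i (s ≤ i) out of enumerate xs s = take ++ drop
lemma dva_enumFilter (xs : List Int) : ∀ (s i : Int), s ≤ i →
    ((PySem.List.enumerate xs s).filter (fun p => p.1 ≠ i)).map (·.2)
      = xs.take (i - s).toNat ++ xs.drop ((i - s).toNat + 1) := by
  induction xs with
  | nil => intro s i h; simp [PySem.List.enumerate_nil]
  | cons x xs ih =>
    intro s i h
    rw [PySem.List.enumerate_cons]
    simp only [List.filter_cons]
    by_cases hsi : s = i
    · rw [if_neg (by simp [hsi])]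
      subst hsi
      rw [dva_enumFilter_lt xs (s + 1) s (by omega)]
      simp
    · rw [if_pos (by simp; omega)]
      simp only [List.map_cons, ih (s + 1) i (by omega)]
      have h1 : (i - s).toNat = (i - (s + 1)).toNat + 1 := by omega
      rw [h1]
      simp [List.take_succ_cons, List.drop_succ_cons]

-- loop characterisation: with enough fuel, dvaLoop appends one row per remaining index
lemma dvaLoop_eq (xs : List Int) : ∀ (fuel : Nat) (i : Int) (ret : List (List Int)),
    (xs.length : Int) ≤ i + fuel →
    dvaLoop xs ret i fuel = ret ++ (PySem.List.pyRange i (xs.length : Int) 1).map (fun j =>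
      PySem.List.slice xs (some 0) (some j) ++ PySem.List.slice xs (some (j + 1)) (some (xs.length : Int))) := by
  intro fuel
  induction fuel with
  | zero =>
    intro i ret h
    rw [dvaLoop, PySem.List.pyRange_one_eq_nil (by push_cast at h ⊢; omega)]
    simp
  | succ fuel ih =>
    intro i ret h
    rw [dvaLoop]
    by_cases hi : i < (xs.length : Int)
    · rw [if_pos hi, ih (i + 1) _ (by push_cast at h ⊢; omega),
        PySem.List.pyRange_one_cons hi]
      simp
    · rw [if_neg hi, PySem.List.pyRange_one_eq_nil (by omega)]
      simp

-- ===== VERDICT (by name: the statement is the Claim_ definition above) =====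
theorem different_version_of_array_spec : Claim_equal_different_version_of_array := by
  intro xs _
  show _ = _
  rw [different_version_of_array, dvaLoop_eq xs _ 0 [] (by push_cast; omega)]
  rw [different_version_of_array_alt, List.nil_append]
  apply List.map_congr_left
  intro i hi
  rw [PySem.List.mem_pyRange_one] at hi
  rw [dva_rowA xs i hi.1, dva_enumFilter xs 0 i hi.1]
  simp
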